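-- pv_equiv track=rewrite | github.com/pypi-data/pypi-mirror-401 | packages/astronomo/astronomo-0.13.1.tar.gz/astronomo-0.13.1/src/astronomo/widgets/certificate_details_modal.py | _format_fingerprint
-- ===== SOURCE A (Python) =====
-- def _format_fingerprint(fingerprint: str) -> str:
--     """Format fingerprint for readable display."""
--     # Remove sha256: prefix if present
--     if fingerprint.startswith("sha256:"):
--         fp = fingerprint[7:]
--     else:
--         fp = fingerprint
--
--     # Split into groups of 4 for readability
--     groups = [fp[i : i + 4] for i in range(0, len(fp), 4)]
--     # Join with spaces, 8 groups per line (32 chars)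
--     lines = []
--     for i in range(0, len(groups), 8):
--         lines.append(" ".join(groups[i : i + 8]))
--     return "\n".join(lines)
-- ===== SOURCE B (Python) =====
-- def _format_fingerprint(fingerprint: str) -> str:
--     """Format fingerprint for readable display."""
--     if fingerprint.startswith("sha256:"):
--         fp = fingerprint[7:]
--     else:
--         fp = fingerprint
--
--     # Single pass over the characters, inserting a separator before each
--     # character whose index is a positive multiple of 4 (newline at
--     # multiples of 32, space otherwise).
--     out = []
--     for k, ch in enumerate(fp):
--         if k:
--             if k % 32 == 0:
--                 out.append("\n")
--             elif k % 4 == 0: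
--                 out.append(" ")
--         out.append(ch)
--     return "".join(out)
-- ===== Notes on version B (the rewrite author's own statement) =====
-- stated objective: alternative
-- what changed: Instead of A's staged passes (build all 4-char slices, then regroup 8 per line and join twice), B makes a single enumerate pass over the characters, emitting a newline before each index that is a positive multiple of 32 and a space before every other positive multiple of 4.
import Mathlib
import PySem

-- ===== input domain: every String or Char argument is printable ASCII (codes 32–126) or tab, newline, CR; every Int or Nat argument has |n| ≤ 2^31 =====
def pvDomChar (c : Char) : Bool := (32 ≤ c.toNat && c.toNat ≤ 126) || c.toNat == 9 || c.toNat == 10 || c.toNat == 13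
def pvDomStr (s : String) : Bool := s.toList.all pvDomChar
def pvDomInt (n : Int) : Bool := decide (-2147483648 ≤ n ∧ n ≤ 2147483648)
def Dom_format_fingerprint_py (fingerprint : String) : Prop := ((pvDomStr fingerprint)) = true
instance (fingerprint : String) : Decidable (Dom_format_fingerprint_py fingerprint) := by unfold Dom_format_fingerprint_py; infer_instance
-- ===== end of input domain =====

-- B replaces A's staged passes (all 4-char slices, regrouped 8 per line, joined twice) by ONE
-- enumerate pass over the characters that emits '\n' before each index that is a positive multiple
-- of 32 and ' ' before every other positive multiple of 4 (alternative decomposition, same cost).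

-- ===== PORT A =====
def format_fingerprint_py (fingerprint : String) : String :=
  let fp := if PySem.Str.startswith fingerprint "sha256:"
            then PySem.Str.slice fingerprint (some 7) none else fingerprint
  let groups := (PySem.List.pyRange 0 (PySem.Str.len fp) 4).map
      (fun i => PySem.Str.slice fp (some i) (some (i + 4)))
  let lines := (PySem.List.pyRange 0 (groups.length : Int) 8).foldl
      (fun acc i => acc ++ [PySem.Str.join " " (PySem.List.slice groups (some i) (some (i + 8)))]) []
  PySem.Str.join "\n" lines

-- ===== PORT B =====
-- '"".join' of the single-character strings is ported exactly as a Char-list accumulator + String.ofList.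
def format_fingerprint_py_alt (fingerprint : String) : String :=
  let fp := if PySem.Str.startswith fingerprint "sha256:"
            then PySem.Str.slice fingerprint (some 7) none else fingerprint
  let out := (PySem.List.enumerate fp.toList).foldl
      (fun acc kc =>
        (if kc.1 ≠ 0 then
           (if PySem.Int.mod kc.1 32 == 0 then acc ++ ['\n']
            else if PySem.Int.mod kc.1 4 == 0 then acc ++ [' ']
            else acc)
         else acc) ++ [kc.2]) []
  String.ofList out

-- ===== PRECONDITION & SPEC =====
def Spec_format_fingerprint_py (fingerprint : String) (out : String) : Prop := out = format_fingerprint_py_alt fingerprint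
instance (fingerprint : String) (out : String) : Decidable (Spec_format_fingerprint_py fingerprint out) := by unfold Spec_format_fingerprint_py; infer_instance

-- ===== CLAIM (what is proved, stated in full; the proofs are below) =====
def Claim_equal_format_fingerprint_py : Prop := ∀ (fingerprint : String), Dom_format_fingerprint_py fingerprint → Spec_format_fingerprint_py fingerprint (format_fingerprint_py fingerprint)

-- ===== LEMMAS AND PROOFS =====

/-- cs split into consecutive chunks of size n+1 (last one possibly shorter). -/
def pvChunks {α : Type} (n : ℕ) (cs : List α) : List (List α) :=
  if h : cs = [] then [] else cs.take (n+1) :: pvChunks n (cs.drop (n+1))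
termination_by cs.length
decreasing_by
  simp only [List.length_drop]
  have := List.length_pos_of_ne_nil h
  omega

theorem pvCnt_succ (n L : ℕ) (h : 0 < L) :
    (L + n) / (n+1) = ((L - (n+1)) + n) / (n+1) + 1 := by
  by_cases h2 : L ≤ n + 1
  · have h1 : L - (n+1) = 0 := by omega
    have ha : (L + n) / (n+1) = 1 := Nat.div_eq_of_lt_le (k := 1) (by omega) (by omega)
    have hb : (0 + n) / (n+1) = 0 := Nat.div_eq_of_lt (by omega)
    rw [h1, ha, hb]
  · have h3 : L + n = ((L - (n+1)) + n) + (n+1) := by omega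
    rw [h3, Nat.add_div_right _ (Nat.succ_pos n)]

theorem pvRangeChunks {α : Type} (n : ℕ) (cs : List α) :
    (List.range ((cs.length + n) / (n+1))).map (fun k => (cs.drop ((n+1)*k)).take (n+1))
      = pvChunks n cs := by
  rcases eq_or_ne cs [] with rfl | h
  · rw [pvChunks]
    simp [Nat.div_eq_of_lt (by omega : n < n+1)]
  · have hL : 0 < cs.length := List.length_pos_of_ne_nil h
    rw [pvChunks]
    simp only [h, dite_false]
    rw [pvCnt_succ n cs.length hL, List.range_succ_eq_map, List.map_cons, List.map_map]
    have ih := pvRangeChunks n (cs.drop (n+1))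
    simp only [List.length_drop] at ih
    rw [← ih]
    refine congrArg₂ List.cons (by simp) ?_
    apply List.map_congr_left
    intro a _
    simp only [Function.comp_apply, List.drop_drop]
    congr 2
    simp only [Nat.succ_eq_add_one]
    ring
termination_by cs.length
decreasing_by
  simp only [List.length_drop]
  have := List.length_pos_of_ne_nil h
  omega

theorem pvFoldlAppend {α β : Type} (f : α → β) (l : List α) (init : List β) :
    l.foldl (fun acc x => acc ++ [f x]) init = init ++ l.map f := by
  induction l generalizing init with
  | nil => simp
  | cons x xs ih => simp [ih]

theorem pvChunks_map {α β : Type} (g : α → β) (n : ℕ) (cs : List α) :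
    pvChunks n (cs.map g) = (pvChunks n cs).map (List.map g) := by
  rcases eq_or_ne cs [] with rfl | h
  · simp [pvChunks]
  · have hg : cs.map g ≠ [] := by simp [h]
    conv_lhs => rw [pvChunks]
    conv_rhs => rw [pvChunks]
    simp only [hg, h, dite_false, List.map_cons]
    rw [← List.map_take, ← List.map_drop, pvChunks_map g n (cs.drop (n+1))]
termination_by cs.length
decreasing_by
  simp only [List.length_drop]
  have := List.length_pos_of_ne_nil h
  omega

theorem pvChunks_take {α : Type} (n : ℕ) (k : ℕ) (cs : List α) :
    (pvChunks n cs).take k = pvChunks n (cs.take ((n+1)*k)) := by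
  induction k generalizing cs with
  | zero =>
    rw [Nat.mul_zero, List.take_zero, List.take_zero, pvChunks]
    simp
  | succ k ih =>
    rcases eq_or_ne cs [] with rfl | h
    · simp [pvChunks]
    · have htk : cs.take ((n+1)*(k+1)) ≠ [] := by
        simp only [ne_eq, List.take_eq_nil_iff, not_or]
        exact ⟨by positivity, h⟩
      conv_lhs => rw [pvChunks]
      conv_rhs => rw [pvChunks]
      simp only [h, dite_false, htk, dite_false, List.take_succ_cons]
      have hmul : (n+1)*(k+1) - (n+1) = (n+1)*k := by
        rw [Nat.mul_succ, Nat.add_sub_cancel]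
      refine congrArg₂ List.cons ?_ ?_
      · rw [List.take_take, Nat.min_eq_left (Nat.le_mul_of_pos_right (n+1) (by omega))]
      · rw [ih, List.drop_take, hmul]

theorem pvChunks_drop {α : Type} (n : ℕ) (k : ℕ) (cs : List α) :
    (pvChunks n cs).drop k = pvChunks n (cs.drop ((n+1)*k)) := by
  induction k generalizing cs with
  | zero => simp
  | succ k ih =>
    rcases eq_or_ne cs [] with rfl | h
    · simp [pvChunks]
    · conv_lhs => rw [pvChunks]
      simp only [h, dite_false, List.drop_succ_cons]
      rw [ih, List.drop_drop]
      congr 2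
      ring

theorem pvChunks731 {α : Type} (cs : List α) :
    pvChunks 7 (pvChunks 3 cs) = (pvChunks 31 cs).map (pvChunks 3) := by
  rcases eq_or_ne cs [] with rfl | h
  · simp [pvChunks]
  · have h3 : pvChunks 3 cs ≠ [] := by rw [pvChunks]; simp [h]
    conv_lhs => rw [pvChunks]
    conv_rhs => rw [pvChunks]
    simp only [h3, dite_false, h, dite_false, List.map_cons]
    have ht : (pvChunks 3 cs).take 8 = pvChunks 3 (cs.take 32) := pvChunks_take 3 8 cs
    have hd : (pvChunks 3 cs).drop 8 = pvChunks 3 (cs.drop 32) := pvChunks_drop 3 8 cs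
    rw [ht, hd, pvChunks731 (cs.drop 32)]
termination_by cs.length
decreasing_by
  simp only [List.length_drop]
  have := List.length_pos_of_ne_nil h
  omega

/-- pyRange with positive natural step and bound as a plain List.range map. -/
theorem pvRangeStep (s : ℕ) (hs : 0 < s) (L : ℕ) :
    PySem.List.pyRange 0 (L : Int) (s : Int) =
      (List.range ((L + s - 1)/s)).map (fun k => ((s*k : ℕ) : Int)) := by
  rw [PySem.List.pyRange_of_pos _ _ (by exact_mod_cast hs)]
  have hcount : (if (0:Int) < (L:Int) then (((L:Int) - 0 + s - 1)/s).toNat else 0) = (L + s - 1)/s := by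
    split_ifs with hpos
    · have h1 : ((L:Int) - 0 + s - 1) = ((L + s - 1 : ℕ) : Int) := by omega
      rw [h1, ← Int.natCast_div, Int.toNat_natCast]
    · have hL0 : L = 0 := by omega
      subst hL0
      rw [Nat.div_eq_of_lt (by omega)]
  rw [hcount]
  congr 1
  funext k
  push_cast
  ring

/-- one slice-map pass over a step-s range is pvChunks (on any list). -/
theorem pvSliceMapChunks {α : Type} (m : ℕ) (xs : List α) :
    (PySem.List.pyRange 0 (xs.length : Int) ((m+1 : ℕ) : Int)).map
        (fun i => PySem.List.slice xs (some i) (some (i + ((m+1:ℕ) : Int))))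
      = pvChunks m xs := by
  rw [pvRangeStep (m+1) (Nat.succ_pos m) xs.length, List.map_map]
  rw [← pvRangeChunks m xs]
  have hc : xs.length + (m+1) - 1 = xs.length + m := by omega
  rw [hc]
  congr 1
  funext k
  simp only [Function.comp_apply]
  exact PySem.List.slice_natCast_add xs ((m+1)*k) (m+1)

theorem pvStrLen_eq (s : String) : PySem.Str.len s = (s.toList.length : Int) := rfl

-- ---- B-side machinery: the separator-emitting single pass ----

theorem pvMod_eq (k m : Int) (hm : 0 ≤ m) : PySem.Int.mod k m = k % m := by
  simp only [PySem.Int.mod]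
  rw [Int.fmod_eq_emod, if_pos (Or.inl hm), add_zero]

/-- the separator B emits before the character at index k. -/
def pvSep (k : Int) : List Char :=
  if k = 0 then [] else if k % 32 = 0 then ['\n'] else if k % 4 = 0 then [' '] else []

/-- B's pass, index-explicit. -/
def pvG : List Char → Int → List Char
  | [], _ => []
  | c :: cs, k => pvSep k ++ c :: pvG cs (k+1)

theorem pvFoldG (cs : List Char) (k : Int) (acc : List Char) :
    (PySem.List.enumerate cs k).foldl
      (fun acc kc =>
        (if kc.1 ≠ 0 then
           (if PySem.Int.mod kc.1 32 == 0 then acc ++ ['\n']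
            else if PySem.Int.mod kc.1 4 == 0 then acc ++ [' ']
            else acc)
         else acc) ++ [kc.2]) acc = acc ++ pvG cs k := by
  induction cs generalizing k acc with
  | nil => simp [pvG, PySem.List.enumerate]
  | cons c cs ih =>
    rw [PySem.List.enumerate_cons, List.foldl_cons, ih]
    have hstep :
        ((if k ≠ 0 then
            (if PySem.Int.mod k 32 == 0 then acc ++ ['\n']
             else if PySem.Int.mod k 4 == 0 then acc ++ [' ']
             else acc)
          else acc) ++ [c]) = acc ++ pvSep k ++ [c] := by
      simp only [pvMod_eq _ _ (by norm_num : (0:Int) ≤ 32), pvMod_eq _ _ (by norm_num : (0:Int) ≤ 4),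
        beq_iff_eq, pvSep]
      split_ifs <;> simp_all
    rw [hstep, pvG]
    simp

theorem pvG_append (xs ys : List Char) (k : Int) :
    pvG (xs ++ ys) k = pvG xs k ++ pvG ys (k + xs.length) := by
  induction xs generalizing k with
  | nil => simp [pvG]
  | cons x xs ih =>
    simp only [List.cons_append, pvG, ih, List.length_cons]
    have : k + 1 + (xs.length : Int) = k + ((xs.length : Int) + 1) := by ring
    rw [this]
    push_cast
    simp [List.append_assoc]

theorem pvSep_shift32 (k : Int) (h : 1 ≤ k) : pvSep (k + 32) = pvSep k := by
  unfold pvSep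
  split_ifs <;> first | rfl | omega

theorem pvSep_shift4 (k : Int) (h1 : 1 ≤ k) (h2 : k + 4 ≤ 31) : pvSep (k + 4) = pvSep k := by
  unfold pvSep
  split_ifs <;> first | rfl | omega

theorem pvG_shift32 (ys : List Char) (k : Int) (h : 1 ≤ k) : pvG ys (k + 32) = pvG ys k := by
  induction ys generalizing k with
  | nil => rfl
  | cons c t ih =>
    simp only [pvG, pvSep_shift32 k h]
    have : k + 32 + 1 = (k + 1) + 32 := by ring
    rw [this, ih (k+1) (by omega)]

theorem pvG_shift4 (ys : List Char) (k : Int) (h1 : 1 ≤ k) (h2 : k + 4 + ys.length ≤ 32) :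
    pvG ys (k + 4) = pvG ys k := by
  induction ys generalizing k with
  | nil => rfl
  | cons c t ih =>
    simp only [List.length_cons] at h2
    simp only [pvG, pvSep_shift4 k h1 (by push_cast at h2 ⊢; omega)]
    have : k + 4 + 1 = (k + 1) + 4 := by ring
    rw [this, ih (k+1) (by omega) (by push_cast at h2 ⊢; omega)]

theorem pvG_small (ys : List Char) (k : Int) (h0 : 0 ≤ k) (h4 : k + ys.length ≤ 4) :
    pvG ys k = ys := by
  induction ys generalizing k with
  | nil => rfl
  | cons c t ih =>
    simp only [List.length_cons] at h4
    have hsep : pvSep k = [] := by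
      unfold pvSep
      split_ifs <;> first | rfl | omega
    simp only [pvG, hsep, List.nil_append]
    rw [ih (k+1) (by omega) (by push_cast at h4 ⊢; omega)]

theorem pvG_four (ys : List Char) (hne : ys ≠ []) (hlen : 4 + ys.length ≤ 32) :
    pvG ys 4 = ' ' :: pvG ys 0 := by
  cases ys with
  | nil => exact absurd rfl hne
  | cons c t =>
    simp only [List.length_cons] at hlen
    have h5 : pvG t 5 = pvG t 1 := by
      have : (5 : Int) = 1 + 4 := by norm_num
      rw [this, pvG_shift4 t 1 (by norm_num) (by push_cast at hlen ⊢; omega)]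
    have hs4 : pvSep 4 = [' '] := by decide
    have hs0 : pvSep 0 = ([] : List Char) := by decide
    simp [pvG, h5, hs4, hs0]

theorem pvG_line32 (ys : List Char) (hne : ys ≠ []) :
    pvG ys 32 = '\n' :: pvG ys 0 := by
  cases ys with
  | nil => exact absurd rfl hne
  | cons c t =>
    have h33 : pvG t 33 = pvG t 1 := by
      have : (33 : Int) = 1 + 32 := by norm_num
      rw [this, pvG_shift32 t 1 (by norm_num)]
    have hs32 : pvSep 32 = ['\n'] := by decide
    have hs0 : pvSep 0 = ([] : List Char) := by decide
    simp [pvG, h33, hs32, hs0]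

theorem pvInterHelp {α : Type} (s a : List α) (r : List (List α)) :
    List.intercalate s (a :: r) = a ++ (if r = [] then [] else s ++ List.intercalate s r) := by
  cases r with
  | nil => simp [List.intercalate]
  | cons b l => simp [List.intercalate, List.intersperse]

theorem pvChunks_ne_nil {α : Type} (n : ℕ) (cs : List α) (h : cs ≠ []) : pvChunks n cs ≠ [] := by
  rw [pvChunks]
  simp [h]

theorem pvG_line (ys : List Char) (hlen : ys.length ≤ 32) :
    pvG ys 0 = List.intercalate [' '] (pvChunks 3 ys) := by
  rcases eq_or_ne ys [] with rfl | h
  · rw [pvChunks]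
    simp [pvG, List.intercalate]
  · rw [pvChunks]
    simp only [h, dite_false]
    norm_num
    by_cases hle : ys.length ≤ 4
    · have hdrop : ys.drop 4 = [] := by
        rw [List.drop_eq_nil_iff]
        omega
      rw [hdrop, pvChunks, List.take_of_length_le hle]
      simp only [dite_true]
      rw [pvInterHelp, if_pos rfl, List.append_nil]
      exact pvG_small ys 0 le_rfl (by omega)
    · have hsplit : ys = ys.take 4 ++ ys.drop 4 := (List.take_append_drop 4 ys).symm
      have hta : (ys.take 4).length = 4 := by
        rw [List.length_take]
        omega
      have hdne : ys.drop 4 ≠ [] := by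
        rw [← List.length_pos_iff_ne_nil, List.length_drop]
        omega
      conv_lhs => rw [hsplit]
      rw [pvG_append, hta]
      have hfour : pvG (ys.drop 4) (0 + (4:ℕ)) = ' ' :: pvG (ys.drop 4) 0 := by
        push_cast
        exact pvG_four (ys.drop 4) hdne (by rw [List.length_drop]; omega)
      rw [hfour, pvG_small (ys.take 4) 0 le_rfl (by rw [hta]; norm_num)]
      rw [pvG_line (ys.drop 4) (by rw [List.length_drop]; omega)]
      rw [pvInterHelp, if_neg (pvChunks_ne_nil 3 (ys.drop 4) hdne)]
      simp
termination_by ys.length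
decreasing_by
  rw [List.length_drop]
  have := List.length_pos_of_ne_nil h
  omega

theorem pvG_main (cs : List Char) :
    pvG cs 0 = List.intercalate ['\n']
      ((pvChunks 31 cs).map (fun c => List.intercalate [' '] (pvChunks 3 c))) := by
  rcases eq_or_ne cs [] with rfl | h
  · rw [pvChunks]
    simp [pvG, List.intercalate]
  · rw [pvChunks]
    simp only [h, dite_false, List.map_cons]
    norm_num
    by_cases hle : cs.length ≤ 32
    · have hdrop : cs.drop 32 = [] := by
        rw [List.drop_eq_nil_iff]
        omega
      rw [hdrop, List.take_of_length_le hle]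
      rw [show pvChunks 31 ([] : List Char) = [] from by rw [pvChunks]; simp]
      simp only [List.map_nil]
      rw [pvInterHelp, if_pos rfl, List.append_nil]
      exact pvG_line cs hle
    · have hsplit : cs = cs.take 32 ++ cs.drop 32 := (List.take_append_drop 32 cs).symm
      have hta : (cs.take 32).length = 32 := by
        rw [List.length_take]
        omega
      have hdne : cs.drop 32 ≠ [] := by
        rw [← List.length_pos_iff_ne_nil, List.length_drop]
        omega
      conv_lhs => rw [hsplit]
      rw [pvG_append, hta]
      have h32 : pvG (cs.drop 32) (0 + (32:ℕ)) = '\n' :: pvG (cs.drop 32) 0 := by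
        push_cast
        exact pvG_line32 (cs.drop 32) hdne
      rw [h32, pvG_line (cs.take 32) (by rw [hta]), pvG_main (cs.drop 32)]
      rw [pvInterHelp, if_neg (by simp [pvChunks_ne_nil 31 (cs.drop 32) hdne])]
      simp
termination_by cs.length
decreasing_by
  rw [List.length_drop]
  have := List.length_pos_of_ne_nil h
  omega

theorem pvJoinChunks (cs : List Char) :
    PySem.Str.join "\n" ((pvChunks 31 cs).map
        (fun c => PySem.Str.join " " ((pvChunks 3 c).map String.ofList)))
      = String.ofList (List.intercalate ['\n']
        ((pvChunks 31 cs).map (fun c => List.intercalate [' '] (pvChunks 3 c)))) := by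
  have h : (PySem.Str.join "\n" ((pvChunks 31 cs).map
        (fun c => PySem.Str.join " " ((pvChunks 3 c).map String.ofList)))).toList
      = List.intercalate ['\n']
        ((pvChunks 31 cs).map (fun c => List.intercalate [' '] (pvChunks 3 c))) := by
    rw [PySem.Str.toList_join]
    simp only [PySem.Chars.join, List.map_map]
    congr 1
    apply List.map_congr_left
    intro c _
    simp only [Function.comp_apply, PySem.Str.toList_join]
    simp [PySem.Chars.join, List.map_map, Function.comp_def]
  rw [← h, String.ofList_toList]

-- ===== VERDICT (by name: the statement is the Claim_ definition above) =====
theorem format_fingerprint_py_spec : Claim_equal_format_fingerprint_py := by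
  intro f _
  unfold Spec_format_fingerprint_py format_fingerprint_py format_fingerprint_py_alt
  generalize (if PySem.Str.startswith f "sha256:" then PySem.Str.slice f (some 7) none else f) = fp
  dsimp only
  set cs := fp.toList with hcs
  -- A's groups are the 4-chunks of cs (as Strings)
  have hgroups :
      (PySem.List.pyRange 0 (PySem.Str.len fp) 4).map
          (fun i => PySem.Str.slice fp (some i) (some (i + 4)))
        = (pvChunks 3 cs).map String.ofList := by
    have h4 := pvSliceMapChunks 3 cs
    norm_num at h4
    rw [pvStrLen_eq, ← hcs, ← h4, List.map_map]
    rfl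
  rw [hgroups]
  -- A's line loop is a map
  rw [pvFoldlAppend (fun i => PySem.Str.join " "
        (PySem.List.slice ((pvChunks 3 cs).map String.ofList) (some i) (some (i + 8)))) _ []]
  -- A's lines: 8-chunks of the group list
  have hlinesA :
      (PySem.List.pyRange 0 ((((pvChunks 3 cs).map String.ofList).length : ℕ) : Int) 8).map
          (fun i => PySem.Str.join " "
            (PySem.List.slice ((pvChunks 3 cs).map String.ofList) (some i) (some (i + 8))))
        = (pvChunks 7 ((pvChunks 3 cs).map String.ofList)).map (PySem.Str.join " ") := by
    have h8 := pvSliceMapChunks 7 ((pvChunks 3 cs).map String.ofList)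
    norm_num at h8
    simp only [List.length_map]
    rw [← h8, List.map_map]
    rfl
  rw [hlinesA]
  -- B's fold is pvG
  rw [pvFoldG cs 0 []]
  simp only [List.nil_append]
  rw [pvG_main cs, ← pvJoinChunks cs]
  -- A's nested chunk form is the per-line form
  rw [pvChunks_map String.ofList 7 (pvChunks 3 cs), pvChunks731 cs, List.map_map, List.map_map]
  rfl
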